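-- pv_equiv track=rewrite | github.com/saisankargochhayat/algo_quest | techdevguide/longestsubsequence.py | findLongestSubSeq
-- ===== SOURCE A (Python) =====
-- from collections import defaultdict
--
-- def findLongestSubSeq(S: str, D: dict):
--     sMap = defaultdict(list)
--     for i, c in enumerate(S):
--         sMap[c].append(i)
--     for word in sorted(D, key=len, reverse=True):
--         count = 0
--         for i, ch in enumerate(word):
--             indexList = sMap[ch]
--             found = False
--             for j in indexList:
--                 if j >= i:
--                     found = True
--                     count += 1
--                     break
--             if not found:
--                 break
--         if count == len(word):
--             return word
--     return None
-- ===== SOURCE B (Python) =====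
-- def findLongestSubSeq(S, D):
--     last = {}
--     for i, c in enumerate(S):
--         last[c] = i
--     best = None
--     bestlen = -1
--     for word in D:
--         if len(word) > bestlen and all(last.get(ch, -1) >= i for i, ch in enumerate(word)):
--             best = word
--             bestlen = len(word)
--     return best
-- ===== Notes on version B (the rewrite author's own statement) =====
-- stated objective: faster
-- what changed: B replaces the per-char index-list scan by an O(1) comparison against the last occurrence index of each character, and replaces the length-descending sort plus first-match scan by a single pass over the dict keys keeping the first longest matching word.
import Mathlib
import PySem

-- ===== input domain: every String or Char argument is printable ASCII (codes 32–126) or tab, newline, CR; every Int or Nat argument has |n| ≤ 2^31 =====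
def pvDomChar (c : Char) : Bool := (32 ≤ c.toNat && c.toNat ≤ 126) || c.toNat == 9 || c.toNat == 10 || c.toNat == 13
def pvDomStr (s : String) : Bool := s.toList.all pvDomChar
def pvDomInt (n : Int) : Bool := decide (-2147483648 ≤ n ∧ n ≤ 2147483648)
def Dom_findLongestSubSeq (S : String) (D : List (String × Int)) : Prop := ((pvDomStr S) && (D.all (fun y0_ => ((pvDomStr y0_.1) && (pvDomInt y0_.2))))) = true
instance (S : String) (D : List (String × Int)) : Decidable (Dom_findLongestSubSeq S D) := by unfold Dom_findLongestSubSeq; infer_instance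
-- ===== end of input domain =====

-- B checks each word position against the LAST occurrence index of its character (O(1) instead of
-- scanning the character's whole index list) and keeps the first longest matching word in one pass
-- over the dict keys instead of sorting them by length; objective: faster (asymptotic).


-- ===== PORT A =====
-- sMap[c].append(i) for each (i, c) in enumerate(S)  (defaultdict(list))
def pvStepA (d : PySem.Dict Char (List Int)) (p : Int × Char) : PySem.Dict Char (List Int) :=
  d.insert p.2 (d.getD p.2 [] ++ [p.1])

-- the inner 'for j in indexList: if j >= i: found = True; break'
def pvCondA (m : PySem.Dict Char (List Int)) (p : Int × Char) : Bool :=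
  (m.getD p.2 []).any (fun j => decide (p.1 ≤ j))

-- the per-word loop: count positions until the first not-found, with break
def pvCount (m : PySem.Dict Char (List Int)) : List (Int × Char) → Int → Int
  | [], count => count
  | e :: es, count => if pvCondA m e then pvCount m es (count + 1) else count

-- 'for word in sorted(D, key=len, reverse=True): … return word' / fall through to None
def pvLoopA (m : PySem.Dict Char (List Int)) : List String → Option String
  | [] => none
  | w :: ws =>
      if pvCount m (PySem.List.enumerate w.toList) 0 = PySem.Str.len w then some w
      else pvLoopA m ws

def findLongestSubSeq (S : String) (D : List (String × Int)) : Option String :=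
  let sMap := (PySem.List.enumerate S.toList).foldl pvStepA PySem.Dict.empty
  pvLoopA sMap (PySem.List.sorted (PySem.Dict.ofList D).keys (fun w => PySem.Str.len w) true)

-- ===== PORT B =====
-- last[c] = i for each (i, c) in enumerate(S): last occurrence index of each character
def pvStepB (d : PySem.Dict Char Int) (p : Int × Char) : PySem.Dict Char Int :=
  d.insert p.2 p.1

-- all(last.get(ch, -1) >= i for i, ch in enumerate(word))
def pvCondB (m : PySem.Dict Char Int) (w : String) : Bool :=
  (PySem.List.enumerate w.toList).all (fun p => decide (p.1 ≤ m.getD p.2 (-1)))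

-- if len(word) > bestlen and all(...): best = word; bestlen = len(word)
def pvPick (m : PySem.Dict Char Int) (st : Option String × Int) (w : String) : Option String × Int :=
  if decide (st.2 < PySem.Str.len w) && pvCondB m w then (some w, PySem.Str.len w) else st

def findLongestSubSeq_alt (S : String) (D : List (String × Int)) : Option String :=
  let last := (PySem.List.enumerate S.toList).foldl pvStepB PySem.Dict.empty
  ((PySem.Dict.ofList D).keys.foldl (pvPick last) (none, -1)).1

-- ===== PRECONDITION & SPEC =====
def Spec_findLongestSubSeq (S : String) (D : List (String × Int)) (out : Option String) : Prop := out = findLongestSubSeq_alt S D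
instance (S : String) (D : List (String × Int)) (out : Option String) : Decidable (Spec_findLongestSubSeq S D out) := by unfold Spec_findLongestSubSeq; infer_instance

-- ===== CLAIM (what is proved, stated in full; the proofs are below) =====
def Claim_equal_findLongestSubSeq : Prop := ∀ (S : String) (D : List (String × Int)), Dom_findLongestSubSeq S D → Spec_findLongestSubSeq S D (findLongestSubSeq S D)

-- ===== LEMMAS AND PROOFS =====

-- proof-side selector: B's fold step on just the Option, without the cached best length
def pvSel (m : PySem.Dict Char Int) (best : Option String) (w : String) : Option String :=
  if pvCondB m w then
    match best with
    | none => some w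
    | some b => if PySem.Str.len b < PySem.Str.len w then some w else best
  else best

-- insertBy into a length-descending-sorted list stays length-descending-sorted
theorem pvPairwise_insertBy {α : Type} (key : α → Int) (x : α) (acc : List α)
    (h : acc.Pairwise (fun a b => key b ≤ key a)) :
    (PySem.List.insertBy (fun a b => decide (key b < key a)) x acc).Pairwise
      (fun a b => key b ≤ key a) := by
  induction acc with
  | nil => simp [PySem.List.insertBy]
  | cons y ys ih =>
    rcases List.pairwise_cons.1 h with ⟨hy, hys⟩
    simp only [PySem.List.insertBy]
    by_cases hlt : key y < key x
    · simp only [hlt, decide_true, if_true]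
      refine List.pairwise_cons.2 ⟨?_, h⟩
      intro z hz
      rcases List.mem_cons.1 hz with hz | hz
      · subst hz; omega
      · have := hy z hz; omega
    · simp only [hlt, decide_false, Bool.false_eq_true, if_false]
      refine List.pairwise_cons.2 ⟨?_, ih hys⟩
      intro z hz
      rcases (PySem.List.mem_insertBy _ _ _ _).1 hz with hz | hz
      · subst hz; omega
      · exact hy z hz

-- first match in the list after a stable descending insertion
theorem pvFind_insertBy {α : Type} (key : α → Int) (p : α → Bool) (x : α) (acc : List α)
    (h : acc.Pairwise (fun a b => key b ≤ key a)) :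
    (PySem.List.insertBy (fun a b => decide (key b < key a)) x acc).find? p =
      match acc.find? p with
      | none => if p x then some x else none
      | some b => if p x && decide (key b < key x) then some x else some b := by
  induction acc with
  | nil => simp [PySem.List.insertBy, List.find?]
  | cons y ys ih =>
    rcases List.pairwise_cons.1 h with ⟨hy, hys⟩
    simp only [PySem.List.insertBy]
    by_cases hlt : key y < key x
    · simp only [hlt, decide_true, if_true]
      by_cases hpx : p x
      · rw [List.find?_cons_of_pos hpx]
        cases hfy : (y :: ys).find? p with
        | none => simp [hpx]
        | some b =>
          have hkb : key b < key x := by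
            rcases List.mem_cons.1 (List.mem_of_find?_eq_some hfy) with h' | h'
            · subst h'; omega
            · have := hy b h'; omega
          simp [hpx, hkb]
      · have hpx' : p x = false := by simpa using hpx
        rw [List.find?_cons_of_neg (by simp [hpx'])]
        cases hfy : (y :: ys).find? p with
        | none => simp [hpx']
        | some b => simp [hpx']
    · simp only [hlt, decide_false, Bool.false_eq_true, if_false]
      by_cases hpy : p y
      · rw [List.find?_cons_of_pos hpy, List.find?_cons_of_pos hpy]
        simp [show decide (key y < key x) = false from by simpa using hlt]
      · have hpy' : ¬ p y = true := hpy
        rw [List.find?_cons_of_neg hpy', List.find?_cons_of_neg hpy', ih hys]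

-- fold of stable descending insertions, read through find?, IS B's single-pass best-keeping fold
theorem pvFold (m : PySem.Dict Char Int) :
    ∀ (ws acc : List String),
      acc.Pairwise (fun a b => PySem.Str.len b ≤ PySem.Str.len a) →
      ((ws.foldl (fun acc x =>
          PySem.List.insertBy (fun a b => decide (PySem.Str.len b < PySem.Str.len a)) x acc) acc).find?
        (pvCondB m))
        = ws.foldl (pvSel m) (acc.find? (pvCondB m)) := by
  intro ws
  induction ws with
  | nil => intro acc _; simp
  | cons w ws ih =>
    intro acc hacc
    simp only [List.foldl_cons]
    rw [ih _ (pvPairwise_insertBy (fun s => PySem.Str.len s) w acc hacc)]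
    congr 1
    rw [pvFind_insertBy (fun s => PySem.Str.len s) (pvCondB m) w acc hacc]
    cases hf : acc.find? (pvCondB m) with
    | none =>
      by_cases hc : pvCondB m w <;> simp [pvSel, hc]
    | some b =>
      by_cases hc : pvCondB m w
      · by_cases hlen : b.length < w.length <;>
          simp [pvSel, hc, hlen]
      · simp [pvSel, show pvCondB m w = false by simpa using hc]

-- B's fold (with the cached best length) projects to the selector fold
theorem pvFold2 (m : PySem.Dict Char Int) :
    ∀ (ws : List String) (st : Option String × Int),
      st.2 = (match st.1 with | none => (-1 : Int) | some b => PySem.Str.len b) →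
      (ws.foldl (pvPick m) st).1 = ws.foldl (pvSel m) st.1 := by
  intro ws
  induction ws with
  | nil => intro st _; rfl
  | cons w ws ih =>
    intro st hst
    obtain ⟨b0, l⟩ := st
    simp only [List.foldl_cons]
    have hw : (0 : Int) ≤ PySem.Str.len w := by simp [PySem.Str.len]
    have hstep : pvPick m (b0, l) w = (pvSel m b0 w,
        (match pvSel m b0 w with | none => (-1 : Int) | some b => PySem.Str.len b)) := by
      cases b0 with
      | none =>
        have hl : l = -1 := by simpa using hst
        subst hl
        by_cases hc : pvCondB m w
        · simp [pvPick, pvSel, hc]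
          omega
        · simp [pvPick, pvSel, hc]
      | some b =>
        have hl : l = PySem.Str.len b := by simpa using hst
        subst hl
        by_cases hc : pvCondB m w
        · by_cases hn : b.length < w.length <;> simp [pvPick, pvSel, hc, hn]
        · simp [pvPick, pvSel, hc]
    rw [hstep, ih _ (by simp)]

-- A's word loop is find? over its success condition
theorem pvLoopA_eq_find? (m : PySem.Dict Char (List Int)) (l : List String) :
    pvLoopA m l = l.find?
      (fun w => decide (pvCount m (PySem.List.enumerate w.toList) 0 = PySem.Str.len w)) := by
  induction l with
  | nil => rfl
  | cons w ws ih =>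
    simp only [pvLoopA]
    by_cases h : pvCount m (PySem.List.enumerate w.toList) 0 = PySem.Str.len w
    · rw [if_pos h, List.find?_cons_of_pos (by simpa using h)]
    · rw [if_neg h, List.find?_cons_of_neg (by simpa using h), ih]

-- A's break-counting loop reaches the word's length exactly when every position is found
theorem pvCount_eq_iff (m : PySem.Dict Char (List Int)) :
    ∀ (es : List (Int × Char)) (k : Int),
      (pvCount m es k = k + es.length) ↔ es.all (pvCondA m) := by
  intro es
  induction es with
  | nil => intro k; simp [pvCount]
  | cons e es ih =>
    intro k
    by_cases h : pvCondA m e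
    · have hstep : pvCount m (e :: es) k = pvCount m es (k + 1) := by simp [pvCount, h]
      rw [hstep]
      have h2 := ih (k + 1)
      constructor
      · intro he
        have : pvCount m es (k + 1) = k + 1 + ↑es.length := by push_cast [List.length_cons] at he ⊢; omega
        simpa [h] using h2.1 this
      · intro he
        have := h2.2 (by simpa [h] using he)
        push_cast [List.length_cons] at this ⊢; omega
    · have hstep : pvCount m (e :: es) k = k := by simp [pvCount, h]
      rw [hstep]
      have hb : pvCondA m e = false := by simpa using h
      have hlen : (0 : Int) ≤ es.length := by positivity
      constructor
      · intro he; exfalso; push_cast [List.length_cons] at he; omega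
      · intro he; simp [hb] at he

-- the two index maps agree: 'some listed occurrence index ≥ x' iff 'last occurrence index ≥ x'
theorem pvDictInv :
    ∀ (xs : List Char) (s : Int) (d1 : PySem.Dict Char (List Int)) (d2 : PySem.Dict Char Int),
      (∀ c x, 0 ≤ x →
        ((d1.getD c []).any (fun j => decide (x ≤ j)) = decide (x ≤ d2.getD c (-1)))) →
      (∀ c, d2.getD c (-1) < s) →
      ∀ c (x : Int), 0 ≤ x →
        (((PySem.List.enumerate xs s).foldl pvStepA d1).getD c []).any (fun j => decide (x ≤ j))
          = decide (x ≤ ((PySem.List.enumerate xs s).foldl pvStepB d2).getD c (-1)) := by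
  intro xs
  induction xs with
  | nil => intro s d1 d2 h1 _ c x hx; simpa using h1 c x hx
  | cons ch xs ih =>
    intro s d1 d2 h1 h2 c x hx
    rw [PySem.List.enumerate_cons]
    simp only [List.foldl_cons]
    refine ih (s + 1) (pvStepA d1 (s, ch)) (pvStepB d2 (s, ch)) ?_ ?_ c x hx
    · intro c' x' hx'
      simp only [pvStepA, pvStepB, PySem.Dict.getD_insert]
      by_cases hc : c' = ch
      · rw [if_pos hc, if_pos hc]
        have hagree := h1 ch x' hx'
        have hlt := h2 ch
        by_cases hxs : x' ≤ s
        · simp [List.any_append, hxs]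
        · have h3 : ¬ x' ≤ d2.getD ch (-1) := by omega
          simp [List.any_append, hagree, hxs, h3]
      · rw [if_neg hc, if_neg hc]
        exact h1 c' x' hx'
    · intro c'
      simp only [pvStepB, PySem.Dict.getD_insert]
      by_cases hc : c' = ch
      · simp [hc]
      · have := h2 c'
        simp only [if_neg hc]
        omega

-- the built maps, from the empty dicts, agree everywhere
theorem pvMaps_agree (S : String) (c : Char) (x : Int) (hx : 0 ≤ x) :
    ((((PySem.List.enumerate S.toList).foldl pvStepA PySem.Dict.empty).getD c []).any
        (fun j => decide (x ≤ j)))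
      = decide (x ≤ ((PySem.List.enumerate S.toList).foldl pvStepB PySem.Dict.empty).getD c (-1)) := by
  refine pvDictInv S.toList 0 PySem.Dict.empty PySem.Dict.empty ?_ ?_ c x hx
  · intro c' x' hx'
    have hne : ¬ x' ≤ (-1 : Int) := by omega
    simp [PySem.Dict.getD, PySem.Dict.get?, PySem.Dict.empty, hne]
  · intro c'
    simp [PySem.Dict.getD, PySem.Dict.get?, PySem.Dict.empty]

-- per-word: A's success condition equals B's
theorem pvCond_agree (S : String) (w : String) :
    (decide (pvCount ((PySem.List.enumerate S.toList).foldl pvStepA PySem.Dict.empty)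
        (PySem.List.enumerate w.toList) 0 = PySem.Str.len w))
      = pvCondB ((PySem.List.enumerate S.toList).foldl pvStepB PySem.Dict.empty) w := by
  set m1 := (PySem.List.enumerate S.toList).foldl pvStepA PySem.Dict.empty
  set m2 := (PySem.List.enumerate S.toList).foldl pvStepB PySem.Dict.empty
  have hlen : PySem.Str.len w = (0 : Int) + (PySem.List.enumerate w.toList).length := by
    simp [PySem.Str.len, PySem.List.length_enumerate]
  rw [hlen]
  have := pvCount_eq_iff m1 (PySem.List.enumerate w.toList) 0
  rw [Bool.eq_iff_iff, decide_eq_true_iff, this]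
  simp only [pvCondB, List.all_eq_true]
  constructor <;> intro h e he
  · have h0 : 0 ≤ e.1 := by
      rcases (PySem.List.mem_enumerate_iff _ _ _).1 he with ⟨k, hk, rfl⟩
      omega
    have := h e he
    simp only [pvCondA] at this
    rw [pvMaps_agree S e.2 e.1 h0] at this
    simpa using this
  · have h0 : 0 ≤ e.1 := by
      rcases (PySem.List.mem_enumerate_iff _ _ _).1 he with ⟨k, hk, rfl⟩
      omega
    have := h e he
    simp only [pvCondA]
    rw [pvMaps_agree S e.2 e.1 h0]
    simpa using this

-- ===== VERDICT (by name: the statement is the Claim_ definition above) =====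
theorem findLongestSubSeq_spec : Claim_equal_findLongestSubSeq := by
  intro S D _
  unfold Spec_findLongestSubSeq findLongestSubSeq findLongestSubSeq_alt
  rw [pvLoopA_eq_find?]
  have hcond : (fun w => decide (pvCount ((PySem.List.enumerate S.toList).foldl pvStepA PySem.Dict.empty)
      (PySem.List.enumerate w.toList) 0 = PySem.Str.len w))
      = pvCondB ((PySem.List.enumerate S.toList).foldl pvStepB PySem.Dict.empty) := by
    funext w; exact pvCond_agree S w
  rw [hcond]
  rw [PySem.List.sorted_rev_eq_foldl_insertBy]
  have h1 := pvFold ((PySem.List.enumerate S.toList).foldl pvStepB PySem.Dict.empty)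
    (PySem.Dict.ofList D).keys [] (by simp)
  have h2 := pvFold2 ((PySem.List.enumerate S.toList).foldl pvStepB PySem.Dict.empty)
    (PySem.Dict.ofList D).keys (none, -1) (by simp)
  simp only [List.find?_nil] at h1
  rw [h1, h2]
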